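-- pv_equiv track=rewrite | github.com/AazimFaiz/Projects-List | Cipher/Scripts/main.py | convert
-- ===== SOURCE A (Python) =====
-- def convert(word):
--     word = str.lower(word)
--     dictionary = {}
--     count = 0
--     new_word = ""
--
--     for letter in word:
--         if letter not in dictionary:
--             if int(ord(letter)) not in range(97, 123) :
--                 if(letter == " "):
--                     new_word += letter
--                 continue
--
--             dictionary[letter] = chr(97 + count)
--             count += 1
--
--         new_word += dictionary[letter]
--
--     return new_word
-- ===== SOURCE B (Python) =====
-- def convert(word):
--     w = str.lower(word)
--     order = list(dict.fromkeys(c for c in w if 'a' <= c <= 'z'))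
--     mapping = {c: chr(97 + i) for i, c in enumerate(order)}
--     out = []
--     for c in w:
--         if 'a' <= c <= 'z':
--             out.append(mapping[c])
--         elif c == ' ':
--             out.append(' ')
--     return ''.join(out)
-- ===== Notes on version B (the rewrite author's own statement) =====
-- stated objective: alternative
-- what changed: A builds the substitution dictionary lazily inside its single output-building loop; B first extracts the distinct a-z letters in first-appearance order and builds the whole letter->letter table, then a separate pass transforms the string through that table.
import Mathlib
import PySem

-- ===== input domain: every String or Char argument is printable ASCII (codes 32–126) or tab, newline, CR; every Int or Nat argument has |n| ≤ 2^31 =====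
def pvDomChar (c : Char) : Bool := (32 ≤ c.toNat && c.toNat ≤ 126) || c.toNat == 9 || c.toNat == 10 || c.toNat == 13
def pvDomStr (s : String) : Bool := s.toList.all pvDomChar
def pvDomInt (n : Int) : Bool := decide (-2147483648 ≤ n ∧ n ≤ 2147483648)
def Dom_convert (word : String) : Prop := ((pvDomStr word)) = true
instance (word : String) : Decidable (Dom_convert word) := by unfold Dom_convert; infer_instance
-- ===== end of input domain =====

-- B rebuilds A's lazy one-pass substitution as a table-build pass followed by a transform pass (alternative decomposition, same cost).

-- ===== PORT A =====
-- the loop of A: state = (dictionary, count, new_word as a char list)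
def convertGo (d : PySem.Dict Char Char) (count : Nat) (acc : List Char) : List Char → List Char
  | [] => acc
  | c :: rest =>
    if d.contains c = false then
      if ¬ (97 ≤ c.toNat ∧ c.toNat < 123) then
        convertGo d count (if c = ' ' then acc ++ [c] else acc) rest
      else
        let d' := d.insert c (Char.ofNat (97 + count))
        convertGo d' (count + 1) (acc ++ [d'.getD c ' ']) rest
    else
      convertGo d count (acc ++ [d.getD c ' ']) rest

def convert (word : String) : String :=
  String.mk (convertGo PySem.Dict.empty 0 [] (PySem.Str.lower word).toList)

-- ===== PORT B =====
def convert_alt (word : String) : String :=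
  let w := (PySem.Str.lower word).toList
  let order := PySem.List.dedup (w.filter (fun c => 'a' ≤ c && c ≤ 'z'))
  let mapping : PySem.Dict Char Char :=
    PySem.Dict.ofList ((PySem.List.enumerate order).map (fun p => (p.2, Char.ofNat (97 + p.1.toNat))))
  String.mk (w.foldl (fun acc c =>
    if 'a' ≤ c ∧ c ≤ 'z' then acc ++ [mapping.getD c ' ']
    else if c = ' ' then acc ++ [' ']
    else acc) [])

-- ===== PRECONDITION & SPEC =====
def Spec_convert (word : String) (out : String) : Prop := out = convert_alt word
instance (word : String) (out : String) : Decidable (Spec_convert word out) := by unfold Spec_convert; infer_instance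

-- ===== CLAIM (what is proved, stated in full; the proofs are below) =====
def Claim_equal_convert : Prop := ∀ (word : String), Dom_convert word → Spec_convert word (convert word)

-- ===== LEMMAS AND PROOFS =====

-- the common reference: substitution with the "seen letters so far" list s
def refF (s : List Char) : List Char → List Char
  | [] => []
  | c :: rest =>
    if c ∈ s then Char.ofNat (97 + s.idxOf c) :: refF s rest
    else if 97 ≤ c.toNat ∧ c.toNat < 123 then
      Char.ofNat (97 + s.length) :: refF (s ++ [c]) rest
    else if c = ' ' then ' ' :: refF s rest
    else refF s rest

-- the first-appearance order accumulated from seed s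
def sdd (s : List Char) : List Char → List Char
  | [] => s
  | c :: rest =>
    if (97 ≤ c.toNat ∧ c.toNat < 123) ∧ c ∉ s then sdd (s ++ [c]) rest else sdd s rest

theorem sdd_prefix (l s : List Char) : s <+: sdd s l := by
  induction l generalizing s with
  | nil => exact List.prefix_rfl
  | cons c rest ih =>
    simp only [sdd]
    split
    · exact (List.prefix_append s [c]).trans (ih (s ++ [c]))
    · exact ih s

-- A's loop equals refF
theorem convertGo_eq_refF (l : List Char) (d : PySem.Dict Char Char) (s acc : List Char)
    (hc : ∀ c, d.contains c = decide (c ∈ s))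
    (hg : ∀ c ∈ s, d.getD c ' ' = Char.ofNat (97 + s.idxOf c)) :
    convertGo d s.length acc l = acc ++ refF s l := by
  induction l generalizing d s acc with
  | nil => simp [convertGo, refF]
  | cons c rest ih =>
    simp only [convertGo, refF, hc c]
    by_cases hm : c ∈ s
    · rw [if_neg (by simp [hm]), if_pos hm, hg c hm, ih d s _ hc hg]
      simp
    · rw [if_pos (by simp [hm]), if_neg hm]
      by_cases haz : 97 ≤ c.toNat ∧ c.toNat < 123
      · rw [if_neg (not_not_intro haz), if_pos haz]
        have h1 : (d.insert c (Char.ofNat (97 + s.length))).getD c ' ' = Char.ofNat (97 + s.length) := by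
          rw [PySem.Dict.getD_insert, if_pos rfl]
        have hc' : ∀ c', (d.insert c (Char.ofNat (97 + s.length))).contains c' = decide (c' ∈ s ++ [c]) := by
          intro c'
          rw [PySem.Dict.contains_insert, hc c']
          simp only [List.mem_append, List.mem_singleton]
          by_cases h' : c' = c <;> simp [h']
        have hg' : ∀ c' ∈ s ++ [c], (d.insert c (Char.ofNat (97 + s.length))).getD c' ' ' =
            Char.ofNat (97 + (s ++ [c]).idxOf c') := by
          intro c' hmem
          rcases List.mem_append.mp hmem with h' | h'
          · have hne : c' ≠ c := fun he => hm (he ▸ h')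
            rw [PySem.Dict.getD_insert, if_neg hne, hg c' h', List.idxOf_append]
            simp [h']
          · rw [List.mem_singleton] at h'
            subst h'
            rw [h1, List.idxOf_append]
            simp [hm]
        have hlen : s.length + 1 = (s ++ [c]).length := by simp
        rw [h1, hlen, ih _ (s ++ [c]) _ hc' hg']
        simp
      · rw [if_pos haz, if_neg haz]
        by_cases hsp : c = ' '
        · rw [if_pos hsp, if_pos hsp, ih d s _ hc hg]
          simp [hsp]
        · rw [if_neg hsp, if_neg hsp, ih d s _ hc hg]

-- B-side helper names (definitionally the pieces of convert_alt)
def ordListOf (w : List Char) : List Char :=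
  PySem.List.dedup (w.filter (fun c => 'a' ≤ c && c ≤ 'z'))

def mapDictOf (w : List Char) : PySem.Dict Char Char :=
  PySem.Dict.ofList ((PySem.List.enumerate (ordListOf w)).map (fun p => (p.2, Char.ofNat (97 + p.1.toNat))))

theorem azIff (c : Char) : ('a' ≤ c ∧ c ≤ 'z') ↔ (97 ≤ c.toNat ∧ c.toNat < 123) := by
  have h1 : ('a' ≤ c) ↔ 97 ≤ c.toNat := by
    rw [Char.le_def, UInt32.le_iff_toNat_le]; rfl
  have h2 : (c ≤ 'z') ↔ c.toNat < 123 := by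
    rw [Char.le_def, UInt32.le_iff_toNat_le]
    change c.val.toNat ≤ 122 ↔ c.val.toNat < 123
    omega
  rw [h1, h2]

theorem ofList_mk {κ ν : Type} [BEq κ] [LawfulBEq κ] (ps : List (κ × ν))
    (h : (ps.map Prod.fst).Nodup) : PySem.Dict.ofList ps = PySem.Dict.mk ps := by
  apply PySem.Dict.ext
  have hfresh := PySem.Dict.items_foldl_insert_fresh ps Prod.fst Prod.snd PySem.Dict.empty
    (by intro a _; exact PySem.Dict.contains_empty a.1) h
  show (ps.foldl (fun d p => d.insert p.1 p.2) PySem.Dict.empty).items = ps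
  rw [hfresh]
  simp [PySem.Dict.empty]

theorem mapLookup (os : List Char) (n : Nat) (c : Char) (hc : c ∈ os) :
    (PySem.Dict.mk ((PySem.List.enumerate os (n : Int)).map
        (fun p => (p.2, Char.ofNat (97 + p.1.toNat))))).getD c ' '
      = Char.ofNat (97 + n + List.idxOf c os) := by
  induction os generalizing n with
  | nil => simp at hc
  | cons x xs ih =>
    rw [PySem.List.enumerate_cons, List.map_cons, PySem.Dict.getD_eq_get?_getD,
      PySem.Dict.get?_mk_cons]
    by_cases hx : x = c
    · subst hx
      simp [List.idxOf_cons_self]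
    · rw [List.mem_cons] at hc
      have hc' : c ∈ xs := hc.resolve_left (fun h => hx h.symm)
      have hcast : (n : Int) + 1 = ((n + 1 : Nat) : Int) := by push_cast; ring
      rw [if_neg (by simp [hx]), hcast, ← PySem.Dict.getD_eq_get?_getD, ih (n + 1) hc',
        List.idxOf_cons_ne _ hx]
      congr 1
      omega

theorem sdd_eq_update (l s : List Char) :
    sdd s l = PySem.Set.update s (l.filter (fun c => decide (97 ≤ c.toNat ∧ c.toNat < 123))) := by
  induction l generalizing s with
  | nil => simp [sdd, PySem.Set.update]
  | cons c rest ih =>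
    simp only [sdd, List.filter_cons]
    by_cases haz : 97 ≤ c.toNat ∧ c.toNat < 123
    · have hstep : ∀ t, PySem.Set.update s (c :: t) = PySem.Set.update (PySem.Set.add s c) t :=
        fun t => rfl
      rw [if_pos (decide_eq_true haz), hstep]
      by_cases hm : c ∈ s
      · rw [if_neg (fun h => h.2 hm), ih s]
        have hadd : PySem.Set.add s c = s := by simp [PySem.Set.add, PySem.Set.contains, hm]
        rw [hadd]
      · rw [if_pos ⟨haz, hm⟩, ih (s ++ [c])]
        have hadd : PySem.Set.add s c = s ++ [c] := by simp [PySem.Set.add, PySem.Set.contains, hm]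
        rw [hadd]
    · rw [if_neg (fun h => haz h.1), ih s, if_neg (by simp [haz])]

theorem sdd_nil_eq_order (w : List Char) : sdd [] w = ordListOf w := by
  rw [sdd_eq_update, PySem.Set.update_nil_left]
  unfold ordListOf
  rw [PySem.List.dedup_eq_ofList]
  congr 1
  apply List.filter_congr
  intro c _
  have h1 : ('a' ≤ c) ↔ 97 ≤ c.toNat := by
    rw [Char.le_def, UInt32.le_iff_toNat_le]; rfl
  have h2 : (c ≤ 'z') ↔ c.toNat < 123 := by
    rw [Char.le_def, UInt32.le_iff_toNat_le]
    change c.val.toNat ≤ 122 ↔ c.val.toNat < 123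
    omega
  simp [h1, h2]

theorem prefix_idxOf (s t : List Char) (c : Char) (h : s <+: t) (hm : c ∈ s) :
    List.idxOf c t = List.idxOf c s := by
  obtain ⟨u, rfl⟩ := h
  rw [List.idxOf_append, if_pos hm]

theorem mapDictOf_getD (w : List Char) (c : Char) (hc : c ∈ ordListOf w) :
    (mapDictOf w).getD c ' ' = Char.ofNat (97 + List.idxOf c (ordListOf w)) := by
  have hnd : (ordListOf w).Nodup := by
    unfold ordListOf
    rw [PySem.List.dedup_eq_ofList]
    exact PySem.Set.nodup_ofList _
  have hkeys : (((PySem.List.enumerate (ordListOf w)).map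
      (fun p => (p.2, Char.ofNat (97 + p.1.toNat)))).map Prod.fst).Nodup := by
    rw [List.map_map]
    have : (Prod.fst ∘ fun (p : Int × Char) => (p.2, Char.ofNat (97 + p.1.toNat))) = (·.2) := rfl
    rw [this, PySem.List.map_snd_enumerate]
    exact hnd
  unfold mapDictOf
  rw [ofList_mk _ hkeys]
  have := mapLookup (ordListOf w) 0 c hc
  simpa using this

-- B's fold equals refF
theorem foldB_eq_refF (w : List Char) (l s acc : List Char)
    (hsz : ∀ c ∈ s, 97 ≤ c.toNat ∧ c.toNat < 123)
    (hsdd : sdd s l = ordListOf w) :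
    l.foldl (fun acc c =>
      if 'a' ≤ c ∧ c ≤ 'z' then acc ++ [(mapDictOf w).getD c ' ']
      else if c = ' ' then acc ++ [' ']
      else acc) acc = acc ++ refF s l := by
  induction l generalizing s acc with
  | nil => simp [refF]
  | cons c rest ih =>
    simp only [List.foldl_cons, refF]
    simp only [sdd] at hsdd
    by_cases hm : c ∈ s
    · have haz := hsz c hm
      rw [if_neg (fun h => h.2 hm)] at hsdd
      have hpre : s <+: ordListOf w := hsdd ▸ sdd_prefix rest s
      rw [if_pos ((azIff c).mpr haz), if_pos hm,
        mapDictOf_getD w c (hpre.subset hm), prefix_idxOf s _ c hpre hm,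
        ih s (acc ++ [Char.ofNat (97 + List.idxOf c s)]) hsz hsdd]
      simp
    · by_cases haz : 97 ≤ c.toNat ∧ c.toNat < 123
      · rw [if_pos ⟨haz, hm⟩] at hsdd
        have hpre : s ++ [c] <+: ordListOf w := hsdd ▸ sdd_prefix rest (s ++ [c])
        have hco : c ∈ ordListOf w := hpre.subset (by simp)
        have hidx : List.idxOf c (ordListOf w) = s.length := by
          rw [prefix_idxOf (s ++ [c]) _ c hpre (by simp), List.idxOf_append, if_neg hm,
            List.idxOf_cons_self]
          simp
        have hsz' : ∀ c' ∈ s ++ [c], 97 ≤ c'.toNat ∧ c'.toNat < 123 := by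
          intro c' hc'
          rcases List.mem_append.mp hc' with h' | h'
          · exact hsz c' h'
          · rw [List.mem_singleton] at h'; exact h' ▸ haz
        rw [if_pos ((azIff c).mpr haz), if_neg hm, if_pos haz, mapDictOf_getD w c hco, hidx,
          ih (s ++ [c]) (acc ++ [Char.ofNat (97 + s.length)]) hsz' hsdd]
        simp
      · rw [if_neg (fun h => haz h.1)] at hsdd
        rw [if_neg (fun h => haz ((azIff c).mp h)), if_neg hm, if_neg haz]
        by_cases hsp : c = ' '
        · rw [if_pos hsp, if_pos hsp, ih s (acc ++ [' ']) hsz hsdd]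
          simp
        · rw [if_neg hsp, if_neg hsp, ih s acc hsz hsdd]

-- ===== VERDICT (by name: the statement is the Claim_ definition above) =====
theorem convert_spec : Claim_equal_convert := by
  intro word _
  unfold Spec_convert convert convert_alt
  have ha := convertGo_eq_refF ((PySem.Str.lower word).toList) PySem.Dict.empty [] []
    (by intro c; simp) (by intro c h; simp at h)
  have hb := foldB_eq_refF ((PySem.Str.lower word).toList) ((PySem.Str.lower word).toList) [] []
    (by intro c h; simp at h) (sdd_nil_eq_order _)
  simp only [List.length_nil] at ha
  rw [ha]
  exact congrArg String.mk hb.symm
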